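-- pv_equiv track=rewrite | github.com/teachamantofish/RAGMaster | AI_RAG/pipeline/3chunker.py | _expand_table_region
-- ===== SOURCE A (Python) =====
-- def _expand_table_region(text: str, start_idx: int) -> int:
--     """Extend a table slice upward to grab leading markers/blank lines."""
--     expanded = start_idx
--     while expanded > 0:
--         prev_nl = text.rfind("\n", 0, max(expanded - 1, 0))
--         line_start = 0 if prev_nl == -1 else prev_nl + 1
--         candidate = text[line_start:expanded]
--         stripped = candidate.strip()
--         if not stripped:
--             expanded = line_start
--             continue
--         if stripped == "<!-- Data Table -->" or stripped.startswith("Table:"):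
--             expanded = line_start
--             continue
--         break
--     return expanded
-- ===== SOURCE B (Python) =====
-- def _expand_table_region(text: str, start_idx: int) -> int:
--     """Extend a table slice upward to grab leading markers/blank lines."""
--     if start_idx <= 0:
--         return start_idx
--     prefix = text[:start_idx]
--     segments = prefix.split("\n")
--     offsets = []
--     off = 0
--     for seg in segments:
--         offsets.append(off)
--         off += len(seg) + 1
--     boundary = start_idx
--     for seg, o in zip(reversed(segments), reversed(offsets)):
--         s = seg.strip()
--         if s == "" or s == "<!-- Data Table -->" or s.startswith("Table:"):
--             boundary = o
--         else:
--             break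
--     return boundary
-- ===== Notes on version B (the rewrite author's own statement) =====
-- stated objective: alternative
-- what changed: A walks upward with a repeated text.rfind('\n') while-loop re-slicing the text each iteration; B splits the prefix text[:start_idx] into lines once, pairs each line with its precomputed starting offset, and scans the (line, offset) pairs backwards until the first non-blank/non-marker line.
import Mathlib
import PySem

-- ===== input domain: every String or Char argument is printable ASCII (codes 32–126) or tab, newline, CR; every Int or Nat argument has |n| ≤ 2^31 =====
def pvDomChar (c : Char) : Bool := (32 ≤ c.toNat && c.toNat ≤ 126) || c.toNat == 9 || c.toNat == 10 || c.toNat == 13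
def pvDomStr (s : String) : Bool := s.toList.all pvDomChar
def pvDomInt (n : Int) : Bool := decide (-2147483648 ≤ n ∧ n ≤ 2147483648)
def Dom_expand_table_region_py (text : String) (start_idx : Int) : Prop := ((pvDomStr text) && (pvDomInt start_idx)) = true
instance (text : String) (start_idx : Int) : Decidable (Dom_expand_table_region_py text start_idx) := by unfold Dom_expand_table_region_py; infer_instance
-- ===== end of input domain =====

-- B replaces A's repeated-rfind while-loop by one split of the prefix into lines with their
-- offsets, scanned once from the last line backwards (objective: alternative decomposition).

-- ===== PORT A =====
-- helper for A's termination proof: split a list at its LAST newline (proof tool, not part of the algorithm)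
def splitLastNl : List Char → Option (List Char × List Char)
  | [] => none
  | c :: rest =>
    match splitLastNl rest with
    | some (q, t) => some (c :: q, t)
    | none => if c = '\n' then some ([], rest) else none

theorem splitLastNl_none_iff (p : List Char) : splitLastNl p = none ↔ '\n' ∉ p := by
  induction p with
  | nil => simp [splitLastNl]
  | cons c rest ih =>
    simp only [splitLastNl]
    rcases h : splitLastNl rest with _ | ⟨q, t⟩
    · rw [h] at ih
      by_cases hc : c = '\n'
      · simp [hc]
      · simp only [if_neg hc]
        constructor
        · intro _
          simp only [List.mem_cons, not_or]
          exact ⟨fun hh => hc hh.symm, ih.1 rfl⟩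
        · intro _; trivial
    · have hmem : '\n' ∈ rest := by
        by_contra hm
        rw [← ih] at hm
        rw [hm] at h; cases h
      simp [hmem]

theorem splitLastNl_some (p q t : List Char) (h : splitLastNl p = some (q, t)) :
    p = q ++ '\n' :: t ∧ '\n' ∉ t := by
  induction p generalizing q t with
  | nil => cases h
  | cons c rest ih =>
    simp only [splitLastNl] at h
    rcases h' : splitLastNl rest with _ | ⟨q', t'⟩ <;> rw [h'] at h
    · by_cases hc : c = '\n'
      · rw [if_pos hc] at h
        injection h with h
        injection h with h1 h2
        subst h1; subst h2
        exact ⟨by simp [hc], (splitLastNl_none_iff rest).1 h'⟩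
      · rw [if_neg hc] at h; cases h
    · injection h with h
      injection h with h1 h2
      obtain ⟨hrest, hnt⟩ := ih q' t' h'
      subst h1; subst h2; subst hrest
      exact ⟨by simp, hnt⟩

-- characterisation of Python's text.rfind("\n", 0, m)
theorem rfind_go_nl_neg (s : List Char) (k : Nat) (h : '\n' ∉ s) :
    PySem.Chars.rfind.go s ['\n'] k = -1 := by
  induction k with
  | zero =>
    simp only [PySem.Chars.rfind.go]
    have hpre : ¬ (['\n'].isPrefixOf s = true) := by
      cases s with
      | nil => simp [List.isPrefixOf]
      | cons a s' =>
        simp only [List.mem_cons, not_or] at h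
        simp only [List.isPrefixOf, Bool.and_eq_true, beq_iff_eq]
        intro hc
        exact h.1 hc.1
    simp [hpre]
  | succ j ih =>
    simp only [PySem.Chars.rfind.go]
    have hpre : ¬ (['\n'].isPrefixOf (s.drop (j + 1)) = true) := by
      intro hc
      have hmem : '\n' ∈ s.drop (j + 1) := by
        cases hd : s.drop (j + 1) with
        | nil => rw [hd] at hc; simp [List.isPrefixOf] at hc
        | cons a s' =>
          rw [hd] at hc
          simp only [List.isPrefixOf, Bool.and_eq_true, beq_iff_eq] at hc
          rw [hc.1]; simp
      exact h (List.mem_of_mem_drop hmem)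
    simp [hpre, ih]

theorem rfind_go_nl_pos (q t : List Char) (k : Nat) (ht : '\n' ∉ t) (hk : q.length ≤ k) :
    PySem.Chars.rfind.go (q ++ '\n' :: t) ['\n'] k = (q.length : Int) := by
  induction k with
  | zero =>
    have hq : q = [] := by
      cases q with
      | nil => rfl
      | cons a q' => simp at hk
    subst hq
    simp [PySem.Chars.rfind.go, List.isPrefixOf]
  | succ j ih =>
    simp only [PySem.Chars.rfind.go]
    by_cases he : q.length = j + 1
    · have hd : (q ++ '\n' :: t).drop (j + 1) = '\n' :: t := by
        rw [← he]; simp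
      rw [hd]
      simp [List.isPrefixOf, he]
    · have hle : q.length ≤ j := by omega
      have hd : (q ++ '\n' :: t).drop (j + 1) = t.drop (j - q.length) := by
        rw [List.drop_append]
        rw [List.drop_eq_nil_of_le (by omega)]
        simp only [List.nil_append]
        have h1 : j + 1 - q.length = (j - q.length) + 1 := by omega
        rw [h1, List.drop_succ_cons]
      rw [hd]
      have hpre : ¬ (['\n'].isPrefixOf (t.drop (j - q.length)) = true) := by
        intro hc
        have hmem : '\n' ∈ t.drop (j - q.length) := by
          cases hdd : t.drop (j - q.length) with
          | nil => rw [hdd] at hc; simp [List.isPrefixOf] at hc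
          | cons a s' =>
            rw [hdd] at hc
            simp only [List.isPrefixOf, Bool.and_eq_true, beq_iff_eq] at hc
            rw [hc.1]; simp
        exact ht (List.mem_of_mem_drop hmem)
      simp only [hpre, if_false, Bool.false_eq_true]
      exact ih hle

theorem rfindNl_eq (s : List Char) (m : Nat) :
    PySem.Chars.rfindFrom s ['\n'] 0 (some (m : Int)) =
      (if PySem.Chars.rfind.go (s.take m) ['\n'] (s.take m).length = -1 then (-1 : Int)
       else 0 + PySem.Chars.rfind.go (s.take m) ['\n'] (s.take m).length) := by
  have hm0 : ¬ ((m : Int) < 0) := by omega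
  have h00 : ¬ ((0 : Int) < 0) := by omega
  simp only [PySem.Chars.rfindFrom, PySem.Chars.rfind, hm0, h00, if_false]
  by_cases hsm : ((s.length : Int)) < (m : Int)
  · rw [if_pos hsm]
    rw [if_neg (by omega)]
    have hts : s.take ((s.length : Int)).toNat = s.take m := by
      rw [Int.toNat_natCast, List.take_of_length_le (le_refl _),
        List.take_of_length_le (by omega)]
    simp only [Int.toNat_zero, List.drop_zero, hts]
  · rw [if_neg hsm]
    rw [if_neg (by omega)]
    simp only [Int.toNat_natCast, Int.toNat_zero, List.drop_zero]

theorem rfindNl_none (s : List Char) (m : Nat) (h : splitLastNl (s.take m) = none) :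
    PySem.Chars.rfindFrom s ['\n'] 0 (some (m : Int)) = -1 := by
  rw [rfindNl_eq, rfind_go_nl_neg _ _ ((splitLastNl_none_iff _).1 h)]
  simp

theorem rfindNl_some (s : List Char) (m : Nat) (q t : List Char)
    (h : splitLastNl (s.take m) = some (q, t)) :
    PySem.Chars.rfindFrom s ['\n'] 0 (some (m : Int)) = (q.length : Int) := by
  obtain ⟨hp, hnt⟩ := splitLastNl_some _ _ _ h
  rw [rfindNl_eq, hp, rfind_go_nl_pos q t _ hnt (by simp),
    if_neg (show ¬ ((q.length : Int) = -1) from by omega)]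
  omega

-- bound used by A's termination: the computed line_start is < expanded
theorem lineStart_lt (cs : List Char) (e : Int) (he : 0 < e) :
    (if PySem.Chars.rfindFrom cs ['\n'] 0 (some (max (e - 1) 0)) = -1 then (0 : Int)
     else PySem.Chars.rfindFrom cs ['\n'] 0 (some (max (e - 1) 0)) + 1).toNat < e.toNat := by
  have hm : max (e - 1) 0 = (((e - 1).toNat : Nat) : Int) := by omega
  rw [hm]
  rcases hsp : splitLastNl (cs.take (e - 1).toNat) with _ | ⟨q, t⟩
  · rw [rfindNl_none _ _ hsp]
    rw [if_pos rfl]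
    omega
  · rw [rfindNl_some _ _ _ _ hsp]
    obtain ⟨hp, _⟩ := splitLastNl_some _ _ _ hsp
    have hlen : q.length + 1 ≤ (e - 1).toNat := by
      have h2 : (cs.take (e - 1).toNat).length ≤ (e - 1).toNat := by simp
      rw [hp] at h2
      simp at h2
      omega
    rw [if_neg (show ¬ ((q.length : Int) = -1) from by omega)]
    omega

-- literal transliteration of A's while-loop (expanded strictly decreases)
def expandLoopA (cs : List Char) (expanded : Int) : Int :=
  if h : 0 < expanded then
    let prev_nl := PySem.Chars.rfindFrom cs ['\n'] 0 (some (max (expanded - 1) 0))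
    let line_start : Int := if prev_nl = -1 then 0 else prev_nl + 1
    let candidate := PySem.Chars.slice cs (some line_start) (some expanded)
    let stripped := PySem.Chars.strip candidate
    if stripped = [] then expandLoopA cs line_start
    else if stripped = "<!-- Data Table -->".toList ∨
        PySem.Chars.startswith stripped "Table:".toList then expandLoopA cs line_start
    else expanded
  else expanded
termination_by expanded.toNat
decreasing_by
  · exact lineStart_lt cs expanded h
  · exact lineStart_lt cs expanded h

def expand_table_region_py (text : String) (start_idx : Int) : Int :=
  expandLoopA text.toList start_idx

-- ===== PORT B =====
-- one step of Source B's offsets loop: state = (offsets so far, running offset)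
def offsStep (st : List Int × Int) (seg : List Char) : List Int × Int :=
  (st.1 ++ [st.2], st.2 + seg.length + 1)

-- Source B's backward scan over (segment, offset) pairs, boundary as accumulator
def scanRev : List (List Char × Int) → Int → Int
  | [], b => b
  | (seg, o) :: rest, b =>
    let s := PySem.Chars.strip seg
    if s = [] ∨ s = "<!-- Data Table -->".toList ∨
        PySem.Chars.startswith s "Table:".toList then scanRev rest o
    else b

def expand_table_region_py_alt (text : String) (start_idx : Int) : Int :=
  if start_idx ≤ 0 then start_idx
  else
    let pre := PySem.Chars.slice text.toList none (some start_idx)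
    let segments := pre.splitOn '\n'
    let offsets := (segments.foldl offsStep ([], 0)).1
    scanRev ((segments.zip offsets).reverse) start_idx

-- ===== PRECONDITION & SPEC =====
def Spec_expand_table_region_py (text : String) (start_idx : Int) (out : Int) : Prop := out = expand_table_region_py_alt text start_idx
instance (text : String) (start_idx : Int) (out : Int) : Decidable (Spec_expand_table_region_py text start_idx out) := by unfold Spec_expand_table_region_py; infer_instance

-- ===== CLAIM (what is proved, stated in full; the proofs are below) =====
def Claim_equal_expand_table_region_py : Prop := ∀ (text : String) (start_idx : Int), Dom_expand_table_region_py text start_idx → Spec_expand_table_region_py text start_idx (expand_table_region_py text start_idx)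

-- ===== LEMMAS AND PROOFS =====

theorem splitLastNl_of_eq (q t : List Char) (h : '\n' ∉ t) :
    splitLastNl (q ++ '\n' :: t) = some (q, t) := by
  induction q with
  | nil =>
    simp only [List.nil_append, splitLastNl]
    rw [(splitLastNl_none_iff t).2 h]
    simp
  | cons c q ih =>
    simp only [List.cons_append, splitLastNl, ih]

-- the (segment, offset) pairs of p, last line first (fuelled helper + wrapper)
def rsegsF : Nat → List Char → List (List Char × Int)
  | 0, p => [(p, 0)]
  | f + 1, p =>
    match splitLastNl p with
    | none => [(p, 0)]
    | some (q, t) => (t, (q.length : Int) + 1) :: rsegsF f q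

def rsegs (p : List Char) : List (List Char × Int) := rsegsF (p.length + 1) p

theorem rsegsF_fuel (f : Nat) : ∀ (g : Nat) (p : List Char), p.length < f → p.length < g →
    rsegsF f p = rsegsF g p := by
  induction f with
  | zero => intro g p hf _; omega
  | succ f ihf =>
    intro g p hf hg
    cases g with
    | zero => omega
    | succ g =>
      simp only [rsegsF]
      rcases hsp : splitLastNl p with _ | ⟨q, t⟩
      · simp [hsp]
      · obtain ⟨hp, _⟩ := splitLastNl_some _ _ _ hsp
        have hq : q.length < p.length := by rw [hp]; simp
        simp only [hsp]
        rw [ihf g q (by omega) (by omega)]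

theorem rsegs_none {p : List Char} (h : splitLastNl p = none) : rsegs p = [(p, 0)] := by
  unfold rsegs
  simp only [rsegsF, h]

theorem rsegsF_succ_some (f : Nat) (p q t : List Char) (h : splitLastNl p = some (q, t)) :
    rsegsF (f + 1) p = (t, (q.length : Int) + 1) :: rsegsF f q := by
  simp only [rsegsF, h]

theorem rsegs_some {p q t : List Char} (h : splitLastNl p = some (q, t)) :
    rsegs p = (t, (q.length : Int) + 1) :: rsegs q := by
  obtain ⟨hp, _⟩ := splitLastNl_some _ _ _ h
  have hq : q.length < p.length := by rw [hp]; simp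
  unfold rsegs
  rw [rsegsF_succ_some p.length p q t h]
  congr 1
  exact rsegsF_fuel p.length (q.length + 1) q (by omega) (by omega)

theorem splitOnP_ne_nil' {α : Type} (pr : α → Bool) (xs : List α) : xs.splitOnP pr ≠ [] := by
  induction xs with
  | nil => simp [List.splitOnP_nil]
  | cons a l ih =>
    rw [List.splitOnP_cons]
    split_ifs
    · simp
    · cases h : l.splitOnP pr with
      | nil => exact absurd h ih
      | cons b m => simp [h]

theorem splitOn_no_nl (p : List Char) (h : '\n' ∉ p) : p.splitOn '\n' = [p] := by
  induction p with
  | nil => rfl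
  | cons c rest ih =>
    simp only [List.mem_cons, not_or] at h
    simp only [List.splitOn, List.splitOnP_cons] at *
    have hc : ¬ ((c == '\n') = true) := by
      simp only [beq_iff_eq]
      exact fun hh => h.1 hh.symm
    rw [if_neg hc, ih h.2]
    rfl

theorem splitOn_append_nl (q t : List Char) (h : '\n' ∉ t) :
    (q ++ '\n' :: t).splitOn '\n' = q.splitOn '\n' ++ [t] := by
  induction q with
  | nil =>
    simp only [List.nil_append, List.splitOn, List.splitOnP_cons]
    rw [if_pos (by simp)]
    rw [show t.splitOnP (· == '\n') = t.splitOn '\n' from rfl, splitOn_no_nl t h]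
    rfl
  | cons c q ih =>
    simp only [List.cons_append, List.splitOn, List.splitOnP_cons] at *
    split_ifs with hc
    · rw [ih]
      simp
    · rw [ih]
      cases hq : q.splitOnP (· == '\n') with
      | nil => exact absurd hq (splitOnP_ne_nil' _ q)
      | cons b m => simp [hq]

-- the offsets loop of Source B: final offset = p.length + 1, one offset per segment,
-- and the reversed zip is exactly rsegs p
theorem segs_offsets (p : List Char) :
    ((p.splitOn '\n').foldl offsStep ([], 0)).2 = (p.length : Int) + 1 ∧
    ((p.splitOn '\n').foldl offsStep ([], 0)).1.length = (p.splitOn '\n').length ∧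
    ((p.splitOn '\n').zip ((p.splitOn '\n').foldl offsStep ([], 0)).1).reverse = rsegs p := by
  induction hn : p.length using Nat.strong_induction_on generalizing p with
  | _ n ih =>
  subst hn
  rcases hsp : splitLastNl p with _ | ⟨q, t⟩
  · have hnn : '\n' ∉ p := (splitLastNl_none_iff _).1 hsp
    rw [splitOn_no_nl p hnn, rsegs_none hsp]
    exact ⟨by simp [offsStep], by simp [offsStep], by simp [offsStep]⟩
  · obtain ⟨hp, hnt⟩ := splitLastNl_some _ _ _ hsp
    have hl : p.length = q.length + 1 + t.length := by rw [hp]; simp; omega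
    obtain ⟨ih2, ihl, ihz⟩ := ih q.length (by omega) q rfl
    rw [hp, splitOn_append_nl q t hnt, List.foldl_append]
    refine ⟨?_, ?_, ?_⟩
    · simp only [List.foldl_cons, List.foldl_nil, offsStep, ih2]
      rw [← hp, hl]
      push_cast
      ring
    · simp only [List.foldl_cons, List.foldl_nil, offsStep]
      simp [ihl]
    · simp only [List.foldl_cons, List.foldl_nil, offsStep]
      rw [List.zip_append ihl.symm]
      simp only [List.reverse_append, ih2]
      rw [rsegs_some (splitLastNl_of_eq q t hnt), ihz]
      simp

-- strip drops a trailing newline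
theorem strip_append_nl (u : List Char) :
    PySem.Chars.strip (u ++ ['\n']) = PySem.Chars.strip u := by
  simp only [PySem.Chars.strip, PySem.Chars.lstrip, PySem.Chars.rstrip]
  rw [List.dropWhile_append]
  split_ifs with h
  · rw [List.isEmpty_iff] at h
    rw [h]
    decide
  · simp only [List.reverse_append, List.reverse_cons, List.reverse_nil, List.nil_append]
    simp only [List.singleton_append, List.dropWhile_cons]
    rw [if_pos (by decide)]

theorem expandLoopA_nonpos (cs : List Char) (e : Int) (he : ¬ 0 < e) :
    expandLoopA cs e = e := by
  rw [expandLoopA.eq_def, dif_neg he]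

-- one scan step of B
theorem scanRev_cons (seg : List Char) (o b : Int) (rest : List (List Char × Int)) :
    scanRev ((seg, o) :: rest) b =
      if PySem.Chars.strip seg = [] ∨ PySem.Chars.strip seg = "<!-- Data Table -->".toList ∨
          PySem.Chars.startswith (PySem.Chars.strip seg) "Table:".toList
      then scanRev rest o else b := rfl

-- an empty segment always matches: B moves the boundary to its offset
theorem scanRev_empty_seg (o b : Int) (rest : List (List Char × Int)) :
    scanRev (([], o) :: rest) b = scanRev rest o := by
  rw [scanRev_cons, if_pos (Or.inl (by decide))]

-- A's branch chain equals B's single disjunctive test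
theorem ifchain (S : List Char) (X Y B : Int) (hXY : X = Y) :
    (if S = [] then X
     else if S = "<!-- Data Table -->".toList ∨ PySem.Chars.startswith S "Table:".toList then X
     else B)
    = (if S = [] ∨ S = "<!-- Data Table -->".toList ∨ PySem.Chars.startswith S "Table:".toList
       then Y else B) := by
  subst hXY
  by_cases h1 : S = []
  · simp [h1]
  · by_cases h2 : S = "<!-- Data Table -->".toList ∨ PySem.Chars.startswith S "Table:".toList
    · simp [h1, h2]
    · simp [h1, h2]

-- slice with Nat bounds is drop-of-take
theorem slice_nat (cs : List Char) (k n : Nat) :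
    PySem.Chars.slice cs (some (k : Int)) (some (n : Int)) = (cs.take n).drop k := by
  rw [PySem.Chars.slice_eq_listSlice, PySem.List.slice_natCast, List.drop_take]

-- the heart: A's loop equals B's backward scan over the line structure of the prefix
theorem mainA (n : Nat) (cs : List Char) (e : Int) (he : 0 ≤ e) (hn : e.toNat = n) :
    expandLoopA cs e = scanRev (rsegs (cs.take n)) e := by
  induction n using Nat.strong_induction_on generalizing cs e with
  | _ n ih =>
  by_cases hpos : 0 < e
  case neg =>
    have he0 : e = 0 := by omega
    have hn0 : n = 0 := by omega
    subst he0; subst hn0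
    rw [expandLoopA_nonpos _ _ hpos, List.take_zero, rsegs_none rfl]
    decide
  case pos =>
  have hen : e = (n : Int) := by omega
  subst hen
  have hn1 : 1 ≤ n := by omega
  rw [expandLoopA.eq_def, dif_pos hpos]
  have hmax : max ((n : Int) - 1) 0 = (((n - 1 : Nat)) : Int) := by omega
  rw [hmax]
  rcases hsp' : splitLastNl (cs.take (n - 1)) with _ | ⟨q', t'⟩
  · -- no newline in text[:n-1]
    rw [rfindNl_none _ _ hsp']
    simp only []
    rw [if_pos True.intro]
    have hc0 : PySem.Chars.slice cs (some 0) (some (n : Int)) = (cs.take n).drop 0 := by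
      have hs := slice_nat cs 0 n
      simpa using hs
    rw [hc0, List.drop_zero]
    have hnn' : '\n' ∉ cs.take (n - 1) := (splitLastNl_none_iff _).1 hsp'
    have hx : expandLoopA cs 0 = scanRev [] 0 := expandLoopA_nonpos cs 0 (by omega)
    rcases hsp : splitLastNl (cs.take n) with _ | ⟨q, t⟩
    · -- whole prefix newline-free: single segment
      rw [rsegs_none hsp, scanRev_cons]
      exact ifchain _ _ _ _ hx
    · -- the only '\n' of the prefix is its LAST char: take n cs = q ++ ['\n'], t = []
      obtain ⟨hp, hnt⟩ := splitLastNl_some _ _ _ hsp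
      have hclen : n ≤ cs.length := by
        by_contra hcl
        push_neg at hcl
        have h1 : cs.take n = cs := List.take_of_length_le (by omega)
        have h2 : cs.take (n - 1) = cs := List.take_of_length_le (by omega)
        rw [h1] at hp
        apply hnn'
        rw [h2, hp]
        simp
      have hplen : (cs.take n).length = n := by simp [hclen]
      have hpt : cs.take (n - 1) = (cs.take n).take (n - 1) := by
        rw [List.take_take]
        congr 1
        omega
      have ht0 : t = [] := by
        by_contra htne
        apply hnn'
        rw [hpt, hp]
        rw [List.take_append]
        have hql : q.length + 2 ≤ n := by
          have h3 := congrArg List.length hp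
          rw [hplen] at h3
          simp at h3
          have h4 : 1 ≤ t.length := List.length_pos_of_ne_nil htne
          omega
        have h5 : n - 1 - q.length = (n - 2 - q.length) + 1 := by omega
        rw [h5, List.take_succ_cons]
        simp
      subst ht0
      have hqlen : (q.length : Int) + 1 = (n : Int) := by
        have h3 := congrArg List.length hp
        rw [hplen] at h3
        simp at h3
        omega
      have hq : q = cs.take (n - 1) := by
        rw [hpt, hp, List.take_append]
        have hql : q.length = n - 1 := by
          have h3 := congrArg List.length hp
          rw [hplen] at h3
          simp at h3
          omega
        rw [List.take_of_length_le (by omega), hql]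
        simp
      have hqnone : splitLastNl q = none := by
        apply (splitLastNl_none_iff _).2
        rw [hq]
        exact hnn'
      rw [rsegs_some hsp, scanRev_empty_seg, hqlen, rsegs_none hqnone, scanRev_cons]
      rw [hp, strip_append_nl]
      exact ifchain _ _ _ _ hx
  · -- last newline of text[:n-1] is at index q'.length
    rw [rfindNl_some _ _ _ _ hsp']
    simp only []
    obtain ⟨hp', hnt'⟩ := splitLastNl_some _ _ _ hsp'
    have hq'len : q'.length + 1 ≤ n - 1 := by
      have h2 : (cs.take (n - 1)).length ≤ n - 1 := by simp
      rw [hp'] at h2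
      simp at h2
      omega
    rw [if_neg (show ¬ ((q'.length : Int) = -1) from by omega)]
    have hcast : (q'.length : Int) + 1 = (((q'.length + 1 : Nat)) : Int) := by push_cast; ring
    rw [hcast, slice_nat]
    -- the prefix up to the found newline is q' ++ ['\n']
    have htakeq : cs.take (q'.length + 1) = q' ++ ['\n'] := by
      have h1 : cs.take (q'.length + 1) = (cs.take (n - 1)).take (q'.length + 1) := by
        rw [List.take_take]
        congr 1
        omega
      rw [h1, hp', List.take_append,
        List.take_of_length_le (by omega)]
      have h6 : q'.length + 1 - q'.length = 1 := by omega
      rw [h6]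
      rfl
    -- the recursive/matched continuation agrees via the IH
    have hrec : expandLoopA cs ((q'.length + 1 : Nat) : Int) =
        scanRev (rsegs q') ((q'.length : Int) + 1) := by
      have hih := ih (q'.length + 1) (by omega) cs ((q'.length + 1 : Nat) : Int) (by omega)
        (by simp)
      rw [hih, htakeq, rsegs_some (splitLastNl_of_eq q' [] (by simp)), scanRev_empty_seg]
    by_cases hcl : cs.length ≤ n - 1
    · -- start_idx beyond the text: both prefixes are all of cs
      have h1 : cs.take (n - 1) = cs := List.take_of_length_le (by omega)
      have h2 : cs.take n = cs := List.take_of_length_le (by omega)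
      have hcs : cs = q' ++ '\n' :: t' := by rw [← h1]; exact hp'
      have hsp : splitLastNl (cs.take n) = some (q', t') := by
        rw [h2, hcs]
        exact splitLastNl_of_eq q' t' hnt'
      have hdrop : ((cs.take n)).drop (q'.length + 1) = t' := by
        rw [h2, hcs, List.drop_append]
        rw [List.drop_eq_nil_of_le (by omega)]
        have h6 : q'.length + 1 - q'.length = 1 := by omega
        rw [h6]
        rfl
      rw [hdrop, rsegs_some hsp, scanRev_cons]
      exact ifchain _ _ _ _ hrec
    · -- the prefix has exactly n characters: it is text[:n-1] plus one more char c
      push_neg at hcl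
      have hclen : n ≤ cs.length := by omega
      have htsucc : cs.take n = cs.take (n - 1) ++ [cs[n - 1]'(by omega)] := by
        have h1 : n = (n - 1) + 1 := by omega
        conv_lhs => rw [h1]
        rw [List.take_succ]
        congr 1
        rw [List.getElem?_eq_getElem (by omega)]
        rfl
      by_cases hc : cs[n - 1]'(by omega) = '\n'
      · -- prefix ends in '\n': an empty last segment that B skips with boundary = n
        have hpform : cs.take n = (q' ++ '\n' :: t') ++ ['\n'] := by
          rw [htsucc, hp', hc]
        have hsp : splitLastNl (cs.take n) = some (q' ++ '\n' :: t', []) := by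
          rw [hpform]
          have h7 : (q' ++ '\n' :: t') ++ ['\n'] = (q' ++ '\n' :: t') ++ '\n' :: ([] : List Char) := rfl
          rw [h7, splitLastNl_of_eq _ _ (by simp)]
        have hdrop : ((cs.take n)).drop (q'.length + 1) = t' ++ ['\n'] := by
          rw [hpform]
          have h7 : (q' ++ '\n' :: t') ++ ['\n'] = q' ++ '\n' :: (t' ++ ['\n']) := by simp
          rw [h7, List.drop_append]
          rw [List.drop_eq_nil_of_le (by omega)]
          have h5 : q'.length + 1 - q'.length = 1 := by omega
          rw [h5]
          rfl
        have hlen2 : ((q' ++ '\n' :: t').length : Int) + 1 = (n : Int) := by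
          have h8 := congrArg List.length hpform
          have h9 : (cs.take n).length = n := by simp [hclen]
          rw [h9] at h8
          simp at h8
          simp only [List.length_append, List.length_cons]
          push_cast
          omega
        rw [hdrop, strip_append_nl, rsegs_some hsp, scanRev_empty_seg, hlen2,
          rsegs_some (splitLastNl_of_eq q' t' hnt'), scanRev_cons]
        exact ifchain _ _ _ _ hrec
      · -- ordinary last line t' ++ [c]
        have hpform : cs.take n = q' ++ '\n' :: (t' ++ [cs[n - 1]'(by omega)]) := by
          rw [htsucc, hp']
          simp
        have hsp : splitLastNl (cs.take n) = some (q', t' ++ [cs[n - 1]'(by omega)]) := by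
          rw [hpform, splitLastNl_of_eq]
          simp only [List.mem_append, not_or]
          exact ⟨hnt', by simp only [List.mem_singleton]; exact fun hh => hc hh.symm⟩
        have hdrop : ((cs.take n)).drop (q'.length + 1) = t' ++ [cs[n - 1]'(by omega)] := by
          rw [hpform, List.drop_append]
          rw [List.drop_eq_nil_of_le (by omega)]
          have h5 : q'.length + 1 - q'.length = 1 := by omega
          rw [h5]
          rfl
        rw [hdrop, rsegs_some hsp, scanRev_cons]
        exact ifchain _ _ _ _ hrec

theorem altB (text : String) (start_idx : Int) (h : ¬ start_idx ≤ 0) :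
    expand_table_region_py_alt text start_idx =
      scanRev (rsegs (text.toList.take start_idx.toNat)) start_idx := by
  rw [expand_table_region_py_alt, if_neg h]
  have hsl : PySem.Chars.slice text.toList none (some start_idx) =
      text.toList.take start_idx.toNat := by
    rw [PySem.Chars.slice_eq_listSlice, PySem.List.slice_to _ (by omega)]
  simp only [hsl]
  exact congrArg (fun l => scanRev l start_idx)
    ((segs_offsets (text.toList.take start_idx.toNat)).2.2)

-- ===== VERDICT (by name: the statement is the Claim_ definition above) =====
theorem expand_table_region_py_spec : Claim_equal_expand_table_region_py := by
  intro text start_idx _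
  unfold Spec_expand_table_region_py expand_table_region_py
  by_cases h : start_idx ≤ 0
  · rw [expandLoopA_nonpos _ _ (by omega), expand_table_region_py_alt, if_pos h]
  · rw [altB text start_idx h]
    exact mainA start_idx.toNat text.toList start_idx (by omega) rfl
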